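-- pv_equiv track=rewrite | github.com/lalawee/capstone-vla | dataset_tools/data_mixer.py | merge_tasks
-- ===== SOURCE A (Python) =====
-- from typing import Any, Dict, List, Optional, Tuple
--
-- def tasks_to_maps(tasks: List[Tuple[int, str]]) -> Tuple[Dict[int, str], Dict[str, int]]:
--     idx2task = {i: t for i, t in tasks}
--     task2idx = {t: i for i, t in tasks}
--     return idx2task, task2idx
--
-- def merge_tasks(a_tasks: List[Tuple[int, str]], b_tasks: List[Tuple[int, str]]) -> Tuple[List[Tuple[int, str]], Dict[int, int]]:
--     """
--     Returns:
--       - merged list [(new_idx, task_str), ...]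
--       - mapping old_b_idx -> new_idx
--     Dedup by task string (so "valid" won't duplicate).
--     """
--     _, a_task2idx = tasks_to_maps(a_tasks)
--     merged_task2idx = dict(a_task2idx)
--
--     merged: List[Tuple[int, str]] = sorted([(i, t) for t, i in merged_task2idx.items()], key=lambda x: x[0])
--
--     def next_index() -> int:
--         return 0 if not merged else (max(i for i, _ in merged) + 1)
--
--     b_old2new: Dict[int, int] = {}
--     for old_i, task_str in b_tasks:
--         if task_str in merged_task2idx:
--             b_old2new[old_i] = merged_task2idx[task_str]
--         else:
--             ni = next_index()
--             merged_task2idx[task_str] = ni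
--             merged.append((ni, task_str))
--             b_old2new[old_i] = ni
--
--     merged.sort(key=lambda x: x[0])
--     return merged, b_old2new
-- ===== SOURCE B (Python) =====
-- def merge_tasks(a_tasks, b_tasks):
--     a_task2idx = {t: i for i, t in a_tasks}
--     base = max(a_task2idx.values(), default=-1) + 1
--
--     # first pass: new task strings of b, in first-appearance order
--     seen = set(a_task2idx)
--     new_strs = []
--     for _, t in b_tasks:
--         if t not in seen:
--             seen.add(t)
--             new_strs.append(t)
--
--     new2idx = {t: base + k for k, t in enumerate(new_strs)}
--     merged = sorted(((i, t) for t, i in a_task2idx.items()), key=lambda x: x[0])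
--     merged += [(base + k, t) for k, t in enumerate(new_strs)]
--     b_old2new = {old_i: (a_task2idx[t] if t in a_task2idx else new2idx[t])
--                  for old_i, t in b_tasks}
--     return merged, b_old2new
-- ===== Notes on version B (the rewrite author's own statement) =====
-- stated objective: faster
-- what changed: B replaces A's evolving-dict loop (a max-scan over the whole merged list for every new b-string, plus a final re-sort) by computing the index base once, collecting the new b-strings in one pass, assigning them sequential indices by enumeration, and building merged and the remap by direct dict lookups.
import Mathlib
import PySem

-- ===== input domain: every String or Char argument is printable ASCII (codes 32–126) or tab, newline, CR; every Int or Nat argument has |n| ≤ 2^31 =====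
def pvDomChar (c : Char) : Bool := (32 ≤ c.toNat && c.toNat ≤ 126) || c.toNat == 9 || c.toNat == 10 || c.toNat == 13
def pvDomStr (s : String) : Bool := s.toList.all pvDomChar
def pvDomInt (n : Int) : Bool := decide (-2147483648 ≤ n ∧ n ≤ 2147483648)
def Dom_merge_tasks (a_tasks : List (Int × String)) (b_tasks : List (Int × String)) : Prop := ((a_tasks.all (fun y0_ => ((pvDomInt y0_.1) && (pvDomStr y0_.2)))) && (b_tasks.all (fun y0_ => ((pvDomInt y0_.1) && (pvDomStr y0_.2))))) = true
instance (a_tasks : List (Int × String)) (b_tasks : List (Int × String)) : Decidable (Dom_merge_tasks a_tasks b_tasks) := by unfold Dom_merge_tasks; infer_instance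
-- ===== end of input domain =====

-- B precomputes the index base and the new b-task strings in one pass, then builds merged and the remap by enumeration and lookup instead of A's per-item max-scan, dict growth and final re-sort (objective: alternative decomposition; return value only).


-- ===== PORT A =====
-- helper: `{t: i for i, t in tasks}` (the a_task2idx half of tasks_to_maps; A never uses idx2task)
def taskToIdx (tasks : List (Int × String)) : PySem.Dict String Int :=
  tasks.foldl (fun d p => d.insert p.2 p.1) PySem.Dict.empty

-- helper: `def next_index(): return 0 if not merged else (max(i for i, _ in merged) + 1)`
def nextIndex (merged : List (Int × String)) : Int :=
  match merged with
  | [] => 0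
  | x :: xs => (xs.foldl (fun m q => max m q.1) x.1) + 1

-- the body of A's `for old_i, task_str in b_tasks:` loop; state = (merged_task2idx, merged, b_old2new)
def mergeStepA (st : PySem.Dict String Int × List (Int × String) × PySem.Dict Int Int)
    (p : Int × String) : PySem.Dict String Int × List (Int × String) × PySem.Dict Int Int :=
  let (m2i, merged, b_old2new) := st
  match m2i.get? p.2 with
  | some idx => (m2i, merged, b_old2new.insert p.1 idx)
  | none =>
    let ni := nextIndex merged
    (m2i.insert p.2 ni, merged ++ [(ni, p.2)], b_old2new.insert p.1 ni)

def merge_tasks (a_tasks : List (Int × String)) (b_tasks : List (Int × String)) : (List (Int × String)) × (List (Int × Int)) :=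
  let a_task2idx := taskToIdx a_tasks
  let merged_task2idx := a_task2idx
  let merged : List (Int × String) :=
    PySem.List.sorted (merged_task2idx.items.map (fun p => (p.2, p.1))) (fun x => x.1)
  let st := b_tasks.foldl mergeStepA (merged_task2idx, merged, PySem.Dict.empty)
  (PySem.List.sorted st.2.1 (fun x => x.1), st.2.2.items)

-- ===== PORT B =====
-- the body of B's first pass: collect unseen task strings of b in first-appearance order
def newStrStep (sn : PySem.Set String × List String) (p : Int × String) :
    PySem.Set String × List String :=
  if PySem.Set.contains sn.1 p.2 then sn
  else (PySem.Set.add sn.1 p.2, sn.2 ++ [p.2])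

def merge_tasks_alt (a_tasks : List (Int × String)) (b_tasks : List (Int × String)) : (List (Int × String)) × (List (Int × Int)) :=
  let a_task2idx : PySem.Dict String Int :=
    a_tasks.foldl (fun d p => d.insert p.2 p.1) PySem.Dict.empty
  let base : Int := PySem.List.maxD a_task2idx.values (fun x => x) (-1) + 1
  let new_strs := (b_tasks.foldl newStrStep (PySem.Set.ofList a_task2idx.keys, [])).2
  let new2idx : PySem.Dict String Int :=
    (PySem.List.enumerate new_strs).foldl (fun d q => d.insert q.2 (base + q.1)) PySem.Dict.empty
  let merged : List (Int × String) :=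
    PySem.List.sorted (a_task2idx.items.map (fun p => (p.2, p.1))) (fun x => x.1)
      ++ (PySem.List.enumerate new_strs).map (fun q => (base + q.1, q.2))
  let b_old2new : PySem.Dict Int Int :=
    b_tasks.foldl
      (fun d p =>
        d.insert p.1 (match a_task2idx.get? p.2 with
                      | some i => i
                      | none => new2idx.getD p.2 0))
      PySem.Dict.empty
  (merged, b_old2new.items)

-- ===== PRECONDITION & SPEC =====
def Spec_merge_tasks (a_tasks : List (Int × String)) (b_tasks : List (Int × String)) (out : (List (Int × String)) × (List (Int × Int))) : Prop := out = merge_tasks_alt a_tasks b_tasks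
instance (a_tasks : List (Int × String)) (b_tasks : List (Int × String)) (out : (List (Int × String)) × (List (Int × Int))) : Decidable (Spec_merge_tasks a_tasks b_tasks out) := by unfold Spec_merge_tasks; infer_instance

-- ===== CLAIM (what is proved, stated in full; the proofs are below) =====
def Claim_equal_merge_tasks : Prop := ∀ (a_tasks : List (Int × String)) (b_tasks : List (Int × String)), Dom_merge_tasks a_tasks b_tasks → Spec_merge_tasks a_tasks b_tasks (merge_tasks a_tasks b_tasks)

-- ===== LEMMAS AND PROOFS =====

-- proof-side vocabulary ------------------------------------------------------

-- A's initial merged list: sorted swapped items of the a-dict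
def M0 (aD : PySem.Dict String Int) : List (Int × String) :=
  PySem.List.sorted (aD.items.map (fun p => (p.2, p.1))) (fun x => x.1)

-- the merged entries the b-loop appends for new strings ts, indices base+k, base+k+1, …
def entsL (base : Int) (k : Nat) (ts : List String) : List (Int × String) :=
  match ts with
  | [] => []
  | t :: ts => (base + (k : Int), t) :: entsL base (k + 1) ts

-- the dict after inserting the new strings ts with those indices
def insAll (base : Int) (k : Nat) (ts : List String) (d : PySem.Dict String Int) :
    PySem.Dict String Int :=
  match ts with
  | [] => d
  | t :: ts => insAll base (k + 1) ts (d.insert t (base + (k : Int)))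

-- the new strings contributed by bs, given a-dict aD and already-collected ns
def bnews (aD : PySem.Dict String Int) (ns : List String) (bs : List (Int × String)) :
    List String :=
  match bs with
  | [] => []
  | p :: bs =>
    if aD.contains p.2 || ns.contains p.2 then bnews aD ns bs
    else p.2 :: bnews aD (ns ++ [p.2]) bs

-- the new index a b-string receives, given the full list of new strings
def valB (aD : PySem.Dict String Int) (base : Int) (full : List String) (t : String) : Int :=
  match aD.get? t with
  | some i => i
  | none => base + (full.idxOf t : Int)

-- basic lemmas ---------------------------------------------------------------

theorem entsL_append (base : Int) (k : Nat) (ns : List String) (t : String) :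
    entsL base k (ns ++ [t]) = entsL base k ns ++ [(base + ((k + ns.length : Nat) : Int), t)] := by
  induction ns generalizing k with
  | nil => simp [entsL]
  | cons x xs ih =>
      simp only [List.cons_append, entsL, ih (k + 1), List.length_cons]
      norm_num
      ring_nf

theorem insAll_append (base : Int) (k : Nat) (ns : List String) (t : String)
    (d : PySem.Dict String Int) :
    insAll base k (ns ++ [t]) d = (insAll base k ns d).insert t (base + ((k + ns.length : Nat) : Int)) := by
  induction ns generalizing k d with
  | nil => simp [insAll]
  | cons x xs ih =>
      simp only [List.cons_append, insAll, ih (k + 1), List.length_cons]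
      norm_num
      ring_nf

theorem insAll_get?_of_not_mem (base : Int) (k : Nat) (ns : List String) (t : String)
    (d : PySem.Dict String Int) (h : t ∉ ns) :
    (insAll base k ns d).get? t = d.get? t := by
  induction ns generalizing k d with
  | nil => simp [insAll]
  | cons x xs ih =>
      simp only [List.mem_cons, not_or] at h
      rw [insAll, ih _ _ h.2, PySem.Dict.get?_insert_of_ne _ _ h.1]

theorem insAll_get?_of_mem (base : Int) (k : Nat) (ns : List String) (t : String)
    (d : PySem.Dict String Int) (hnd : ns.Nodup) (h : t ∈ ns) :
    (insAll base k ns d).get? t = some (base + ((k + ns.idxOf t : Nat) : Int)) := by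
  induction ns generalizing k d with
  | nil => simp at h
  | cons x xs ih =>
      rcases List.nodup_cons.mp hnd with ⟨hx, hxs⟩
      rcases List.mem_cons.mp h with rfl | hmem
      · rw [insAll, insAll_get?_of_not_mem _ _ _ _ _ hx,
          PySem.Dict.get?_insert_self]
        simp [List.idxOf_cons_self]
      · have hne : t ≠ x := by rintro rfl; exact hx hmem
        rw [insAll, ih _ _ hxs hmem, List.idxOf_cons_ne _ (by exact fun e => hne e.symm)]
        congr 2
        omega

theorem mem_entsL (base : Int) (k : Nat) (ts : List String) (p : Int × String)
    (h : p ∈ entsL base k ts) :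
    ∃ j : Nat, j < ts.length ∧ p.1 = base + ((k + j : Nat) : Int) := by
  induction ts generalizing k with
  | nil => simp [entsL] at h
  | cons x xs ih =>
      rcases List.mem_cons.mp h with rfl | hmem
      · exact ⟨0, by simp, by simp⟩
      · obtain ⟨j, hj, hp⟩ := ih (k + 1) hmem
        exact ⟨j + 1, by simp only [List.length_cons]; omega,
          by rw [hp]; congr 1; omega⟩

theorem entsL_pairwise (base : Int) (k : Nat) (ts : List String) :
    (entsL base k ts).Pairwise (fun a b => a.1 ≤ b.1) := by
  induction ts generalizing k with
  | nil => simp [entsL]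
  | cons x xs ih =>
      refine List.pairwise_cons.mpr ⟨?_, ih (k + 1)⟩
      intro p hp
      obtain ⟨j, _, hj⟩ := mem_entsL base (k + 1) xs p hp
      simp only [hj]
      push_cast
      omega

theorem entsL_last_mem (base : Int) (k : Nat) (ts : List String) (h : ts ≠ []) :
    ∃ t, (base + ((k + ts.length - 1 : Nat) : Int), t) ∈ entsL base k ts := by
  induction ts generalizing k with
  | nil => simp at h
  | cons x xs ih =>
      rcases List.eq_nil_or_concat' xs with rfl | _
      · exact ⟨x, by simp [entsL]⟩
      · have hxs : xs ≠ [] := by rintro rfl; simp_all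
        obtain ⟨t, ht⟩ := ih (k + 1) hxs
        refine ⟨t, List.mem_cons_of_mem _ ?_⟩
        have : k + 1 + xs.length - 1 = k + (x :: xs).length - 1 := by
          simp only [List.length_cons]; omega
        rwa [this] at ht

theorem entsL_eq_enumerate (base : Int) (k : Nat) (ts : List String) :
    entsL base k ts = (PySem.List.enumerate ts (k : Int)).map (fun q => (base + q.1, q.2)) := by
  induction ts generalizing k with
  | nil => simp [entsL, PySem.List.enumerate]
  | cons x xs ih =>
      rw [PySem.List.enumerate_cons, entsL]
      have : ((k : Int) + 1) = ((k + 1 : Nat) : Int) := by push_cast; ring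
      rw [this, List.map_cons, ← ih (k + 1)]

theorem foldl_max_le_int (xs : List (Int × String)) (init m : Int) (h0 : init ≤ m)
    (h : ∀ p ∈ xs, p.1 ≤ m) :
    xs.foldl (fun acc q => max acc q.1) init ≤ m := by
  induction xs generalizing init with
  | nil => simpa
  | cons x xs ih =>
      simp only [List.foldl_cons]
      exact ih _ (by have := h x (by simp); omega)
        (fun p hp => h p (List.mem_cons_of_mem _ hp))

theorem nextIndex_eq_of_max (l : List (Int × String)) (m : Int)
    (hmem : ∃ p ∈ l, p.1 = m) (hub : ∀ p ∈ l, p.1 ≤ m) :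
    nextIndex l = m + 1 := by
  obtain ⟨p, hp, rfl⟩ := hmem
  match l, hp with
  | x :: xs, hp =>
    have hle := PySem.List.le_foldl_max_int xs (fun q => q.1) x.1
    have hub' : xs.foldl (fun acc q => max acc q.1) x.1 ≤ p.1 :=
      foldl_max_le_int xs x.1 p.1 (hub x (by simp))
        (fun q hq => hub q (List.mem_cons_of_mem _ hq))
    have hge : p.1 ≤ xs.foldl (fun acc q => max acc q.1) x.1 := by
      rcases List.mem_cons.mp hp with rfl | hmem'
      · exact hle.1
      · exact hle.2 p hmem'
    simp only [nextIndex]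
    omega

-- facts about the a-dict and base --------------------------------------------

theorem mem_M0_fst (aD : PySem.Dict String Int) (p : Int × String) (h : p ∈ M0 aD) :
    p.1 ∈ aD.values := by
  rw [M0, PySem.List.mem_sorted] at h
  obtain ⟨q, hq, rfl⟩ := List.mem_map.mp h
  exact List.mem_map.mpr ⟨q, hq, rfl⟩

theorem M0_eq_nil_iff (aD : PySem.Dict String Int) : M0 aD = [] ↔ aD.values = [] := by
  rw [M0, PySem.List.sorted_eq_nil_iff, List.map_eq_nil_iff, PySem.Dict.values,
    List.map_eq_nil_iff]

theorem M0_pairwise (aD : PySem.Dict String Int) :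
    (M0 aD).Pairwise (fun a b => a.1 ≤ b.1) := by
  exact PySem.List.sorted_pairwise _ _

theorem values_ub (aD : PySem.Dict String Int) (v : Int) (hv : v ∈ aD.values) :
    v ≤ PySem.List.maxD aD.values (fun x => x) (-1) := by
  have hne : aD.values ≠ [] := by rintro h; rw [h] at hv; simp at hv
  rcases hm : PySem.List.max? aD.values (fun x => x) with _ | m
  · exact absurd ((PySem.List.max?_eq_none_iff _ _).mp hm) hne
  · have := PySem.List.max?_isMax hm v hv
    simpa [PySem.List.maxD, hm] using this

theorem values_max_mem (aD : PySem.Dict String Int) (h : aD.values ≠ []) :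
    PySem.List.maxD aD.values (fun x => x) (-1) ∈ aD.values := by
  exact PySem.List.maxD_mem _ _ _ h

-- next_index over the invariant shape ----------------------------------------

theorem nextIndex_shape (aD : PySem.Dict String Int) (base : Int) (ns : List String)
    (hub : ∀ v ∈ aD.values, v ≤ base - 1)
    (hex : aD.values ≠ [] → (base - 1) ∈ aD.values)
    (h0 : aD.values = [] → base = 0) :
    nextIndex (M0 aD ++ entsL base 0 ns) = base + (ns.length : Int) := by
  have hM0ub : ∀ p ∈ M0 aD, p.1 ≤ base - 1 := fun p hp => hub _ (mem_M0_fst aD p hp)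
  rcases List.eq_nil_or_concat' ns with rfl | ⟨ns', t, rfl⟩
  · -- ns = []
    rcases hM : M0 aD with _ | ⟨x, xs⟩
    · have : aD.values = [] := (M0_eq_nil_iff aD).mp hM
      simp [entsL, nextIndex, h0 this]
    · have hne : aD.values ≠ [] := by
        intro hv
        rw [← M0_eq_nil_iff aD] at hv
        simp [hM] at hv
      have hmem := hex hne
      rw [PySem.Dict.values] at hmem
      obtain ⟨q, hq, hq2⟩ := List.mem_map.mp hmem
      have hqm : ((q.2, q.1) : Int × String) ∈ M0 aD := by
        rw [M0, PySem.List.mem_sorted]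
        exact List.mem_map.mpr ⟨q, hq, rfl⟩
      have := nextIndex_eq_of_max (M0 aD ++ entsL base 0 []) (base - 1)
        ⟨(q.2, q.1), by simpa [entsL] using hqm, by simpa using hq2⟩
        (by simpa [entsL] using hM0ub)
      rw [hM] at this
      simpa [entsL] using this
  · -- ns = ns' ++ [t]
    refine Eq.trans (nextIndex_eq_of_max _ (base + ((ns'.length : Nat) : Int)) ?_ ?_) ?_
    · obtain ⟨u, hu⟩ := entsL_last_mem base 0 (ns' ++ [t]) (by simp)
      refine ⟨(base + ((ns'.length : Nat) : Int), u), List.mem_append_right _ ?_, rfl⟩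
      have : 0 + (ns' ++ [t]).length - 1 = ns'.length := by simp
      rwa [this] at hu
    · intro p hp
      rcases List.mem_append.mp hp with hp | hp
      · have := hM0ub p hp; omega
      · obtain ⟨j, hj, hpj⟩ := mem_entsL base 0 _ p hp
        rw [hpj]
        simp only [List.length_append, List.length_cons, List.length_nil] at hj
        push_cast
        omega
    · simp
      ring

-- bnews facts -----------------------------------------------------------------

theorem bnews_fresh_nodup (aD : PySem.Dict String Int) (bs : List (Int × String))
    (ns : List String) (hfr : ∀ t ∈ ns, aD.contains t = false) (hnd : ns.Nodup) :
    (∀ t ∈ bnews aD ns bs, aD.contains t = false) ∧ (ns ++ bnews aD ns bs).Nodup := by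
  induction bs generalizing ns with
  | nil => exact ⟨by simp [bnews], by simpa [bnews] using hnd⟩
  | cons p bs ih =>
      rw [bnews]
      split
      · exact ih ns hfr hnd
      · rename_i hcond
        simp only [Bool.or_eq_true, List.contains_eq_mem, decide_eq_true_eq, not_or] at hcond
        have hfr' : ∀ t ∈ ns ++ [p.2], aD.contains t = false := by
          intro t ht
          rcases List.mem_append.mp ht with ht | ht
          · exact hfr t ht
          · simp only [List.mem_singleton] at ht
            subst ht
            exact Bool.not_eq_true _ ▸ (by simpa using hcond.1)
        have hnd' : (ns ++ [p.2]).Nodup := by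
          simp only [List.nodup_append, List.nodup_cons, List.not_mem_nil, not_false_iff,
            List.nodup_nil, and_true, true_and, hnd]
          intro a ha b hb e
          have hbp : b = p.2 := by simpa using hb
          exact hcond.2 ((e.trans hbp) ▸ ha)
        obtain ⟨h1, h2⟩ := ih (ns ++ [p.2]) hfr' hnd'
        refine ⟨?_, ?_⟩
        · intro t ht
          rcases List.mem_cons.mp ht with rfl | ht
          · simpa using hcond.1
          · exact h1 t ht
        · simpa using h2

theorem mem_bnews (aD : PySem.Dict String Int) (bs : List (Int × String)) (ns : List String)
    (p : Int × String) (hp : p ∈ bs) (h : aD.contains p.2 = false) :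
    p.2 ∈ ns ++ bnews aD ns bs := by
  induction bs generalizing ns with
  | nil => simp at hp
  | cons q bs ih =>
      rw [bnews]
      rcases List.mem_cons.mp hp with rfl | hp
      · split
        · rename_i hcond
          simp only [h, Bool.false_or, List.contains_eq_mem, decide_eq_true_eq] at hcond
          exact List.mem_append_left _ hcond
        · exact List.mem_append_right _ (List.mem_cons_self)
      · split
        · exact ih _ hp
        · have := ih (ns ++ [q.2]) hp
          rwa [← List.append_cons] at this

-- the A loop ------------------------------------------------------------------

theorem idxOf_append_self_of_not_mem (ns ms : List String) (t : String) (h : t ∉ ns) :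
    List.idxOf t (ns ++ t :: ms) = ns.length := by
  induction ns with
  | nil => simp
  | cons x xs ih =>
      have hx : x ≠ t := by intro e; exact h (e ▸ List.mem_cons_self)
      simp only [List.cons_append, List.idxOf_cons_ne _ hx, List.length_cons]
      rw [ih (fun hm => h (List.mem_cons_of_mem _ hm))]

theorem stepA_found (m2i : PySem.Dict String Int) (merged : List (Int × String))
    (d : PySem.Dict Int Int) (p : Int × String) (i : Int) (h : m2i.get? p.2 = some i) :
    mergeStepA (m2i, merged, d) p = (m2i, merged, d.insert p.1 i) := by
  simp [mergeStepA, h]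

theorem stepA_new (m2i : PySem.Dict String Int) (merged : List (Int × String))
    (d : PySem.Dict Int Int) (p : Int × String) (h : m2i.get? p.2 = none) :
    mergeStepA (m2i, merged, d) p
    = (m2i.insert p.2 (nextIndex merged), merged ++ [(nextIndex merged, p.2)],
       d.insert p.1 (nextIndex merged)) := by
  simp [mergeStepA, h]

theorem loopA (aD : PySem.Dict String Int) (base : Int)
    (hub : ∀ v ∈ aD.values, v ≤ base - 1)
    (hex : aD.values ≠ [] → (base - 1) ∈ aD.values)
    (h0 : aD.values = [] → base = 0) :
    ∀ (bs : List (Int × String)) (ns : List String) (d : PySem.Dict Int Int),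
      (∀ t ∈ ns, aD.contains t = false) → ns.Nodup →
      bs.foldl mergeStepA (insAll base 0 ns aD, M0 aD ++ entsL base 0 ns, d)
      = (insAll base 0 (ns ++ bnews aD ns bs) aD,
         M0 aD ++ entsL base 0 (ns ++ bnews aD ns bs),
         bs.foldl (fun d p => d.insert p.1 (valB aD base (ns ++ bnews aD ns bs) p.2)) d) := by
  intro bs
  induction bs with
  | nil => intro ns d hfr hnd; simp [bnews]
  | cons p bs ih =>
      intro ns d hfr hnd
      rw [List.foldl_cons, List.foldl_cons]
      by_cases hc : aD.contains p.2 = true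
      · -- p.2 is an a-task: found, value from aD
        have hnm : p.2 ∉ ns := fun hm => by rw [hfr p.2 hm] at hc; exact Bool.false_ne_true hc
        have hsome : (aD.get? p.2).isSome := by rw [← PySem.Dict.contains_eq_isSome_get?]; exact hc
        obtain ⟨i, hi⟩ := Option.isSome_iff_exists.mp hsome
        have hget : (insAll base 0 ns aD).get? p.2 = some i := by
          rw [insAll_get?_of_not_mem _ _ _ _ _ hnm, hi]
        rw [stepA_found _ _ _ _ i hget]
        have hbn : bnews aD ns (p :: bs) = bnews aD ns bs := by rw [bnews, if_pos (by simp [hc])]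
        rw [hbn]
        have hval : valB aD base (ns ++ bnews aD ns bs) p.2 = i := by rw [valB, hi]
        rw [hval]
        exact ih ns (d.insert p.1 i) hfr hnd
      · have hcf : aD.contains p.2 = false := by simpa using hc
        have hnone : aD.get? p.2 = none := (PySem.Dict.get?_eq_none_iff_contains aD p.2).mpr hcf
        by_cases hm : p.2 ∈ ns
        · -- p.2 already collected as a new task
          have hget : (insAll base 0 ns aD).get? p.2
              = some (base + ((0 + ns.idxOf p.2 : Nat) : Int)) :=
            insAll_get?_of_mem base 0 ns p.2 aD hnd hm
          rw [stepA_found _ _ _ _ _ hget]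
          have hbn : bnews aD ns (p :: bs) = bnews aD ns bs := by
            rw [bnews, if_pos (by simp [List.contains_eq_mem, hm])]
          rw [hbn]
          have hval : valB aD base (ns ++ bnews aD ns bs) p.2
              = base + ((0 + ns.idxOf p.2 : Nat) : Int) := by
            rw [valB, hnone, List.idxOf_append_of_mem hm]
            norm_num
          rw [hval]
          exact ih ns (d.insert p.1 _) hfr hnd
        · -- genuinely new task string
          have hget : (insAll base 0 ns aD).get? p.2 = none := by
            rw [insAll_get?_of_not_mem _ _ _ _ _ hm, hnone]
          rw [stepA_new _ _ _ _ hget]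
          rw [nextIndex_shape aD base ns hub hex h0]
          have hbn : bnews aD ns (p :: bs) = p.2 :: bnews aD (ns ++ [p.2]) bs := by
            rw [bnews, if_neg (by simp [List.contains_eq_mem, hm, hcf])]
          have hfr' : ∀ t ∈ ns ++ [p.2], aD.contains t = false := by
            intro t ht
            rcases List.mem_append.mp ht with ht | ht
            · exact hfr t ht
            · have : t = p.2 := by simpa using ht
              exact this ▸ hcf
          have hnd' : (ns ++ [p.2]).Nodup := by
            simp only [List.nodup_append, List.nodup_cons, List.not_mem_nil, not_false_iff,
              List.nodup_nil, and_true, true_and, hnd]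
            intro a ha b hb e
            have hbp : b = p.2 := by simpa using hb
            exact hm ((e.trans hbp) ▸ ha)
          have hins : (insAll base 0 ns aD).insert p.2 (base + (ns.length : Int))
              = insAll base 0 (ns ++ [p.2]) aD := by
            rw [insAll_append]
            norm_num
          have hents : (M0 aD ++ entsL base 0 ns) ++ [(base + (ns.length : Int), p.2)]
              = M0 aD ++ entsL base 0 (ns ++ [p.2]) := by
            rw [entsL_append, ← List.append_assoc]
            norm_num
          rw [hins, hents]
          have := ih (ns ++ [p.2]) (d.insert p.1 (base + (ns.length : Int))) hfr' hnd'
          rw [this, hbn]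
          have hfull : (ns ++ [p.2]) ++ bnews aD (ns ++ [p.2]) bs
              = ns ++ p.2 :: bnews aD (ns ++ [p.2]) bs := by
            rw [List.append_assoc]; rfl
          rw [hfull]
          have hval : valB aD base (ns ++ p.2 :: bnews aD (ns ++ [p.2]) bs) p.2
              = base + (ns.length : Int) := by
            rw [valB, hnone, idxOf_append_self_of_not_mem _ _ _ hm]
          rw [hval]

-- the B side ------------------------------------------------------------------

theorem bpass (aD : PySem.Dict String Int) :
    ∀ (bs : List (Int × String)) (s : PySem.Set String) (ns : List String),
      (∀ t : String, t ∈ s ↔ (aD.contains t = true ∨ t ∈ ns)) →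
      (bs.foldl newStrStep (s, ns)).2 = ns ++ bnews aD ns bs := by
  intro bs
  induction bs with
  | nil => intro s ns hsn; simp [bnews]
  | cons p bs ih =>
      intro s ns hsn
      have hcond : PySem.Set.contains s p.2 = (aD.contains p.2 || ns.contains p.2) := by
        have h := hsn p.2
        simp only [PySem.Set.contains, List.contains_eq_mem]
        by_cases h1 : aD.contains p.2 = true <;> by_cases h2 : p.2 ∈ s <;> simp_all
      rw [List.foldl_cons, bnews]
      by_cases hb : (aD.contains p.2 || ns.contains p.2) = true
      · rw [if_pos hb]
        have hstep : newStrStep (s, ns) p = (s, ns) := by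
          simp only [newStrStep, hcond, hb, if_pos]
        rw [hstep]
        exact ih s ns hsn
      · rw [if_neg hb]
        have hstep : newStrStep (s, ns) p = (PySem.Set.add s p.2, ns ++ [p.2]) := by
          simp only [newStrStep, hcond]
          rw [if_neg hb]
        rw [hstep]
        have hsn' : ∀ t : String, t ∈ PySem.Set.add s p.2
            ↔ (aD.contains t = true ∨ t ∈ ns ++ [p.2]) := by
          intro t
          rw [PySem.Set.mem_add, hsn t, List.mem_append]
          simp only [List.mem_singleton]
          tauto
        rw [ih _ _ hsn', List.append_assoc]
        rfl

theorem enumfold_getD_not_mem (base : Int) (l : List String) (t : String) :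
    ∀ (k : Int) (d : PySem.Dict String Int), t ∉ l →
      ((PySem.List.enumerate l k).foldl (fun d q => d.insert q.2 (base + q.1)) d).getD t 0
      = d.getD t 0 := by
  induction l with
  | nil => intro k d _; simp [PySem.List.enumerate]
  | cons y ys ih =>
      intro k d hm
      simp only [List.mem_cons, not_or] at hm
      rw [PySem.List.enumerate_cons, List.foldl_cons, ih _ _ hm.2,
        PySem.Dict.getD_insert_of_ne _ _ _ hm.1]

theorem new2idx_getD (base : Int) (full : List String) (t : String) (hnd : full.Nodup)
    (ht : t ∈ full) :
    ((PySem.List.enumerate full).foldl (fun d q => d.insert q.2 (base + q.1))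
      PySem.Dict.empty).getD t 0
    = base + (full.idxOf t : Int) := by
  suffices h : ∀ (l : List String) (k : Int) (d : PySem.Dict String Int), l.Nodup → t ∈ l →
      ((PySem.List.enumerate l k).foldl (fun d q => d.insert q.2 (base + q.1)) d).getD t 0
      = base + k + (l.idxOf t : Int) by
    have := h full 0 PySem.Dict.empty hnd ht
    simpa using this
  intro l
  induction l with
  | nil => intro k d _ ht'; simp at ht'
  | cons x xs ih =>
      intro k d hnd' ht'
      rcases List.nodup_cons.mp hnd' with ⟨hx, hxs⟩
      rw [PySem.List.enumerate_cons, List.foldl_cons]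
      by_cases he : t = x
      · subst he
        rw [enumfold_getD_not_mem base xs t _ _ hx, PySem.Dict.getD_insert_self,
          List.idxOf_cons_self]
        norm_num
      · have hmem : t ∈ xs := (List.mem_cons.mp ht').resolve_left he
        rw [ih (k + 1) _ hxs hmem, List.idxOf_cons_ne _ (fun e => he (e.symm)), Nat.succ_eq_add_one]
        push_cast
        ring

theorem merged_sorted_id (aD : PySem.Dict String Int) (base : Int) (ns : List String)
    (hub : ∀ v ∈ aD.values, v ≤ base - 1) :
    PySem.List.sorted (M0 aD ++ entsL base 0 ns) (fun x => x.1) = M0 aD ++ entsL base 0 ns := by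
  apply PySem.List.sorted_eq_self_of_pairwise
  rw [List.pairwise_append]
  refine ⟨M0_pairwise aD, entsL_pairwise base 0 ns, ?_⟩
  intro p hp q hq
  have h1 : p.1 ≤ base - 1 := hub _ (mem_M0_fst aD p hp)
  obtain ⟨j, _, hj⟩ := mem_entsL base 0 ns q hq
  rw [hj]
  push_cast
  omega

-- ===== VERDICT (by name: the statement is the Claim_ definition above) =====
theorem merge_tasks_spec : Claim_equal_merge_tasks := by
  intro a_tasks b_tasks _
  unfold Spec_merge_tasks
  simp only [merge_tasks, merge_tasks_alt]
  set aD : PySem.Dict String Int :=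
    a_tasks.foldl (fun d p => d.insert p.2 p.1) PySem.Dict.empty with haD
  have hAeq : taskToIdx a_tasks = aD := rfl
  rw [hAeq]
  set base : Int := PySem.List.maxD aD.values (fun x => x) (-1) + 1 with hbase
  have hM : PySem.List.sorted (aD.items.map (fun p => (p.2, p.1))) (fun x => x.1) = M0 aD := rfl
  rw [hM]
  have hub : ∀ v ∈ aD.values, v ≤ base - 1 := by
    intro v hv; have := values_ub aD v hv; omega
  have hex : aD.values ≠ [] → (base - 1) ∈ aD.values := by
    intro h; have := values_max_mem aD h; simpa [hbase] using this
  have h0 : aD.values = [] → base = 0 := by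
    intro h; rw [hbase, h, PySem.List.maxD_nil]; norm_num
  have hloop := loopA aD base hub hex h0 b_tasks [] PySem.Dict.empty
    (by simp) List.nodup_nil
  simp only [insAll, entsL, List.append_nil, List.nil_append] at hloop
  rw [hloop]
  set N := bnews aD [] b_tasks with hN
  obtain ⟨hNfresh, hNnodup⟩ := bnews_fresh_nodup aD b_tasks [] (by simp) List.nodup_nil
  rw [List.nil_append] at hNnodup
  -- the merged lists agree
  have hmerged : PySem.List.sorted (M0 aD ++ entsL base 0 N) (fun x => x.1)
      = M0 aD ++ ((PySem.List.enumerate N).map (fun q => (base + q.1, q.2))) := by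
    rw [merged_sorted_id aD base N hub, entsL_eq_enumerate]
    norm_num
  -- B's first pass computes N
  have hpass : (b_tasks.foldl newStrStep (PySem.Set.ofList aD.keys, [])).2 = N := by
    rw [bpass aD b_tasks (PySem.Set.ofList aD.keys) [] ?_]
    · simp [hN]
    · intro t
      rw [PySem.Set.mem_ofList]
      simp [PySem.Dict.contains_iff_mem_keys]
  -- the remap dicts agree
  have hdict : b_tasks.foldl (fun d p => d.insert p.1 (valB aD base N p.2)) PySem.Dict.empty
      = b_tasks.foldl
          (fun d p =>
            d.insert p.1 (match aD.get? p.2 with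
                          | some i => i
                          | none =>
                            ((PySem.List.enumerate N).foldl (fun d q => d.insert q.2 (base + q.1))
                              PySem.Dict.empty).getD p.2 0))
          PySem.Dict.empty := by
    apply PySem.List.foldl_congr_mem
    intro acc p hp
    congr 1
    rcases hg : aD.get? p.2 with _ | i
    · have hcf : aD.contains p.2 = false := by
        rw [PySem.Dict.contains_eq_isSome_get?, hg]; rfl
      have hmemN : p.2 ∈ N := by
        have := mem_bnews aD b_tasks [] p hp hcf
        simpa [hN] using this
      rw [valB, hg, new2idx_getD base N p.2 hNnodup hmemN]
    · rw [valB, hg]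
  rw [hmerged, hdict, hpass]
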